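-- pv_equiv track=rewrite | github.com/Promete04/Complexity-Algorithms | U3/ex4.py | fuse_count
-- ===== SOURCE A (Python) =====
-- def fuse_count(B, C):
--     # Merge two sorted arrays and count split inversions
--     i, j = 0, 0
--     merged = []
--     inv_count = 0
--
--     while i < len(B) and j < len(C):
--         if B[i] <= C[j]:
--             merged.append(B[i])
--             i += 1
--         else:
--             merged.append(C[j])
--             j += 1
--             inv_count += 1  # Count inversions
--
--     # Add remaining elements
--     merged.extend(B[i:])
--     merged.extend(C[j:])
--
--     return merged, inv_count
-- ===== SOURCE B (Python) =====
-- def fuse_count(B, C):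
--     # Chunked merge: for each element of C, emit the whole run of B elements that
--     # precede it in one slice, then the C element itself; count one pick per C element
--     # emitted this way. Remainders are appended in bulk.
--     merged = []
--     inv_count = 0
--     i = 0
--     for j, c in enumerate(C):
--         k = i
--         while k < len(B) and B[k] <= c:
--             k += 1
--         if k == len(B):
--             return merged + B[i:] + C[j:], inv_count
--         merged += B[i:k]
--         merged.append(c)
--         inv_count += 1
--         i = k
--     return merged + B[i:], inv_count
-- ===== Notes on version B (the rewrite author's own statement) =====
-- stated objective: alternative
-- what changed: Replaces the element-wise two-pointer merge loop by a chunked merge: one outer pass over C that extracts the whole run of B elements preceding each C element (emitted as a slice), appends that C element counting one pick, and returns early with bulk remainders once B is exhausted.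
import Mathlib
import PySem

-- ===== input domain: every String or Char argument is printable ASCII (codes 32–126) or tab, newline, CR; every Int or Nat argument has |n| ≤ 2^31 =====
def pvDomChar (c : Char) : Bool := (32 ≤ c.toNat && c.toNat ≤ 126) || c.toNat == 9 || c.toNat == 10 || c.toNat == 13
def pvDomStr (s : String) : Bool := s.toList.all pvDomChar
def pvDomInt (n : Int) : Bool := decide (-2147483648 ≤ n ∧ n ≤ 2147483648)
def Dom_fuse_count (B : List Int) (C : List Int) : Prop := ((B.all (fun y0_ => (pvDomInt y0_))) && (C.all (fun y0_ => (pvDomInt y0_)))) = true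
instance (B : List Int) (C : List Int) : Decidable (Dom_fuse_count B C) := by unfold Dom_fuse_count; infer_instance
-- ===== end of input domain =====

-- B merges in chunks (a run of B per C element, bulk remainders, early return) instead of
-- A's element-wise two-pointer loop; same return value on every input (alternative, not faster).
-- ===== PORT A =====
-- literal transliteration of A's two-pointer merge loop: consuming the heads of B and C is
-- the loop body with indices i, j; the base cases are merged.extend(B[i:]) / merged.extend(C[j:]).
def fuse_count : List Int → List Int → List Int × Int
  | [], cs => (cs, 0)
  | b :: bs, [] => (b :: bs, 0)
  | b :: bs, c :: cs =>
    if b ≤ c then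
      let r := fuse_count bs (c :: cs)
      (b :: r.1, r.2)
    else
      let r := fuse_count (b :: bs) cs
      (c :: r.1, r.2 + 1)

-- ===== PORT B =====
-- Source B's outer for-loop over C with the current B suffix as state; the inner while that
-- scans to k and the slices B[i:k] / B[k:] are takeWhile / dropWhile of the B suffix;
-- `if k == len(B): return merged + B[i:] + C[j:]` is the early-return branch on rest = [].
def fuse_count_alt : List Int → List Int → List Int × Int
  | bs, [] => (bs, 0)
  | bs, c :: cs =>
    let run := bs.takeWhile (fun b => decide (b ≤ c))
    let rest := bs.dropWhile (fun b => decide (b ≤ c))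
    match rest with
    | [] => (bs ++ c :: cs, 0)
    | _ :: _ =>
      let r := fuse_count_alt rest cs
      (run ++ c :: r.1, r.2 + 1)

-- ===== PRECONDITION & SPEC =====
def Spec_fuse_count (B : List Int) (C : List Int) (out : List Int × Int) : Prop := out = fuse_count_alt B C
instance (B : List Int) (C : List Int) (out : List Int × Int) : Decidable (Spec_fuse_count B C out) := by unfold Spec_fuse_count; infer_instance

-- ===== CLAIM (what is proved, stated in full; the proofs are below) =====
def Claim_equal_fuse_count : Prop := ∀ (B : List Int) (C : List Int), Dom_fuse_count B C → Spec_fuse_count B C (fuse_count B C)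

-- ===== LEMMAS AND PROOFS =====

lemma fuse_count_alt_nil : ∀ (cs : List Int), fuse_count_alt [] cs = (cs, 0) := by
  intro cs
  cases cs with
  | nil => rfl
  | cons c cs => simp [fuse_count_alt]

lemma fuse_eq : ∀ (B C : List Int), fuse_count B C = fuse_count_alt B C := by
  intro B C
  fun_induction fuse_count B C with
  | case1 cs => exact (fuse_count_alt_nil cs).symm
  | case2 b bs => rfl
  | case3 b bs c cs h r ih =>
    show (b :: (fuse_count bs (c :: cs)).1, (fuse_count bs (c :: cs)).2) = _
    rw [ih]
    have htw : (b :: bs).takeWhile (fun y => decide (y ≤ c)) = b :: bs.takeWhile (fun y => decide (y ≤ c)) := by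
      simp [h]
    have hdw : (b :: bs).dropWhile (fun y => decide (y ≤ c)) = bs.dropWhile (fun y => decide (y ≤ c)) := by
      simp [h]
    cases hrest : bs.dropWhile (fun y => decide (y ≤ c)) with
    | nil =>
      have hbs : bs.takeWhile (fun y => decide (y ≤ c)) = bs := by
        have := List.takeWhile_append_dropWhile (p := fun y => decide (y ≤ c)) (l := bs)
        rw [hrest] at this; simpa using this
      simp [fuse_count_alt, hdw, hrest]
    | cons z zs =>
      simp only [fuse_count_alt, htw, hdw, hrest]
      simp
  | case4 b bs c cs h r ih =>
    show (c :: (fuse_count (b :: bs) cs).1, (fuse_count (b :: bs) cs).2 + 1) = _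
    rw [ih]
    have htw : (b :: bs).takeWhile (fun y => decide (y ≤ c)) = [] := by
      simp [h]
    have hdw : (b :: bs).dropWhile (fun y => decide (y ≤ c)) = b :: bs := by
      simp [h]
    simp [fuse_count_alt, htw, hdw]

-- ===== VERDICT (by name: the statement is the Claim_ definition above) =====
theorem fuse_count_spec : Claim_equal_fuse_count := by
  intro B C _dom
  exact fuse_eq B C
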